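-- pv_equiv track=rewrite | github.com/JJW5432/CS2 | gutenberg/wc.py | dict_html
-- ===== SOURCE A (Python) =====
-- def dict_html(d, cutoff=None, key_header="key", value_header="value"):
-- 	#pytest.set_trace()
-- 	if cutoff == None: cutoff = len(d)
-- 	outstring = ["<table border='1px'>"]
-- 	outstring += ["<tr><th>" + key_header + "</th><th>" + value_header + "</th></tr>"]
-- 	while len(outstring)-2 < cutoff:
-- 		highest = max(d.values())
-- 		for key in d:
-- 			if d[key] == highest:
-- 				outstring += ["<tr><td>" + str(key) + "</td><td>" + str(highest) + "</td></tr>"]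
-- 				del d[key]
-- 				break
-- 	outstring += ["</table>"]
-- 	return '\n'.join(outstring)
-- ===== SOURCE B (Python) =====
-- def dict_html(d, cutoff=None, key_header="key", value_header="value"):
--     if cutoff is None:
--         cutoff = len(d)
--     # one stable sort instead of repeated max-scans; reverse=True keeps
--     # insertion order among equal values, matching the first-max tie-break
--     ordered = sorted(d.items(), key=lambda kv: kv[1], reverse=True)
--     rows = ["<table border='1px'>",
--             "<tr><th>" + key_header + "</th><th>" + value_header + "</th></tr>"]
--     for i in range(cutoff):
--         key, value = ordered[i]
--         rows.append("<tr><td>" + str(key) + "</td><td>" + str(value) + "</td></tr>")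
--         del d[key]
--     rows.append("</table>")
--     return "\n".join(rows)
-- ===== Notes on version B (the rewrite author's own statement) =====
-- stated objective: faster
-- what changed: Replaces A's repeated max-scan-and-delete selection loop (rescanning the remaining dict for every emitted row) by one stable reverse sort of the items followed by a single pass over its first cutoff entries.
import Mathlib
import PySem

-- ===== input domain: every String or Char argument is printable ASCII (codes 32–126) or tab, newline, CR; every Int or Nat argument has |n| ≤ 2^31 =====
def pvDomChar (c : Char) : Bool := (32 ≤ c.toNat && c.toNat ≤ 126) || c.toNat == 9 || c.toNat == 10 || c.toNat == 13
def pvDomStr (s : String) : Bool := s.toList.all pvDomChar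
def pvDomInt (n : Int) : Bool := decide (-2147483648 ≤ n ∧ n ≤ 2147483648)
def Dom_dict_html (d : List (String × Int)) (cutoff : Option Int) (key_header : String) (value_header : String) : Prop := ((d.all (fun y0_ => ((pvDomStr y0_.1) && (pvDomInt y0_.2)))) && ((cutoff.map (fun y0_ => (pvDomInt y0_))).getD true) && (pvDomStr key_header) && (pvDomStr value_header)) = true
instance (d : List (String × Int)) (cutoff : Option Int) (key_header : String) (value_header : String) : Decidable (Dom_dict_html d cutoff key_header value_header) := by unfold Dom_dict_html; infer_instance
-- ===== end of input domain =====

-- B replaces A's repeated max-scan-and-delete selection loop by one stable reverse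
-- sort followed by a single indexed pass over its prefix. Python A deletes the
-- emitted keys from d; Python B performs the same deletions; the equivalence proved
-- here is about the return value.

-- ===== PORT A =====
-- 'for key in d: if d[key] == highest: …; del d[key]; break' on a dict: find the
-- first entry whose value equals `highest`, return its key and the dict without it.
def pvFindDel (h : Int) : List (String × Int) → Option (String × List (String × Int))
  | [] => none
  | (k, v) :: rest =>
    if v = h then some (k, rest)
    else (pvFindDel h rest).map (fun p => (p.1, (k, v) :: p.2))

-- termination measure for the while-loop below (cited by decreasing_by)
theorem pvFindDel_length (h : Int) (l : List (String × Int)) (k : String)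
    (rest : List (String × Int)) (hfd : pvFindDel h l = some (k, rest)) :
    rest.length + 1 = l.length := by
  induction l generalizing k rest with
  | nil => simp [pvFindDel] at hfd
  | cons p t ih =>
    obtain ⟨k0, v0⟩ := p
    simp only [pvFindDel] at hfd
    split at hfd
    · simp_all
    · rcases Option.map_eq_some_iff.mp hfd with ⟨⟨k', r'⟩, hp, he⟩
      cases he
      simp [← ih k' r' hp]

-- the 'while len(outstring)-2 < cutoff: …' loop; none = the Python raises
def pvALoop (cutoff : Int) (d : List (String × Int)) (out : List String) :
    Option (List String) :=
  if ((out.length : Int) - 2) < cutoff then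
    match PySem.List.max? (d.map (·.2)) (fun v => v) with
    | none => none            -- max() of an empty dict: ValueError
    | some h =>
      match hfd : pvFindDel h d with
      | none => none          -- unreachable: h is a value of d
      | some (k, rest) =>
        pvALoop cutoff rest
          (out ++ ["<tr><td>" ++ k ++ "</td><td>" ++ PySem.Int.toStr h ++ "</td></tr>"])
  else some out
termination_by d.length
decreasing_by have := pvFindDel_length _ _ _ _ hfd; omega

def dict_html (d : List (String × Int)) (cutoff : Option Int) (key_header : String) (value_header : String) : String :=
  let dd := PySem.Dict.ofList d       -- the Python argument is a dict
  let c := cutoff.getD (dd.size : Int)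
  match pvALoop c dd.items
      ["<table border='1px'>",
       "<tr><th>" ++ key_header ++ "</th><th>" ++ value_header ++ "</th></tr>"] with
  | none => ""                        -- the Python raises here (outside Pre_)
  | some out => PySem.Str.join "\n" (out ++ ["</table>"])

-- ===== PORT B =====
def dict_html_alt (d : List (String × Int)) (cutoff : Option Int) (key_header : String) (value_header : String) : String :=
  let dd := PySem.Dict.ofList d
  let c := cutoff.getD (dd.size : Int)
  let ordered := PySem.List.sorted dd.items (fun kv => kv.2) true
  let rows :=
    (PySem.List.pyRange 0 c 1).foldl
      (fun acc i =>
        acc.bind (fun rs =>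
          (PySem.List.pyGet? ordered i).map (fun kv =>
            rs ++ ["<tr><td>" ++ kv.1 ++ "</td><td>" ++ PySem.Int.toStr kv.2 ++ "</td></tr>"])))
      (some ["<table border='1px'>",
             "<tr><th>" ++ key_header ++ "</th><th>" ++ value_header ++ "</th></tr>"])
  match rows with
  | none => ""                        -- ordered[i] IndexError (outside Pre_)
  | some rs => PySem.Str.join "\n" (rs ++ ["</table>"])

-- ===== PRECONDITION & SPEC =====
-- Pre_ excludes exactly the inputs where the Python A raises: cutoff larger than the
-- number of dict entries makes A call max() on an exhausted dict (ValueError).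
def Pre_dict_html (d : List (String × Int)) (cutoff : Option Int) (key_header : String) (value_header : String) : Prop :=
  cutoff.getD (((PySem.Dict.ofList d).size : Int)) ≤ (((PySem.Dict.ofList d).size : Int))
instance (d : List (String × Int)) (cutoff : Option Int) (key_header : String) (value_header : String) : Decidable (Pre_dict_html d cutoff key_header value_header) := by unfold Pre_dict_html; infer_instance

def pvWitness_dict_html : (List (String × Int)) × Option Int × String × String :=
  ([("a", 2), ("b", 5), ("c", 5)], some 2, "word", "count")

def Spec_dict_html (d : List (String × Int)) (cutoff : Option Int) (key_header : String) (value_header : String) (out : String) : Prop := out = dict_html_alt d cutoff key_header value_header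
instance (d : List (String × Int)) (cutoff : Option Int) (key_header : String) (value_header : String) (out : String) : Decidable (Spec_dict_html d cutoff key_header value_header out) := by unfold Spec_dict_html; infer_instance

-- ===== CLAIM (what is proved, stated in full; the proofs are below) =====
def Claim_equal_dict_html : Prop := ∀ (d : List (String × Int)) (cutoff : Option Int) (key_header : String) (value_header : String), Dom_dict_html d cutoff key_header value_header → Pre_dict_html d cutoff key_header value_header → Spec_dict_html d cutoff key_header value_header (dict_html d cutoff key_header value_header)

-- ===== LEMMAS AND PROOFS =====

-- the row emitted for one dict entry
def pvRow (kv : String × Int) : String :=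
  "<tr><td>" ++ kv.1 ++ "</td><td>" ++ PySem.Int.toStr kv.2 ++ "</td></tr>"

-- inserting below a maximal head leaves the head in place, all along a fold
theorem pvFold_cons_max (t : List (String × Int)) (k0 : String) (h : Int)
    (acc : List (String × Int)) (hle : ∀ y ∈ t, y.2 ≤ h) :
    t.foldl (fun acc x => PySem.List.insertBy (fun a b => decide (b.2 < a.2)) x acc)
        ((k0, h) :: acc)
      = (k0, h) :: t.foldl (fun acc x => PySem.List.insertBy (fun a b => decide (b.2 < a.2)) x acc) acc := by
  induction t generalizing acc with
  | nil => rfl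
  | cons y t ih =>
    have hy : y.2 ≤ h := hle y (by simp)
    have hins : PySem.List.insertBy (fun a b => decide (b.2 < a.2)) y ((k0, h) :: acc)
        = (k0, h) :: PySem.List.insertBy (fun a b => decide (b.2 < a.2)) y acc := by
      simp [PySem.List.insertBy, show ¬ h < y.2 by omega]
    simp only [List.foldl_cons, hins]
    exact ih _ (fun z hz => hle z (by simp [hz]))

-- a maximal element inserted into a list of strictly smaller elements goes to the front
theorem pvInsert_max (k0 : String) (h : Int) (acc : List (String × Int))
    (hacc : ∀ a ∈ acc, a.2 < h) :
    PySem.List.insertBy (fun a b => decide (b.2 < a.2)) (k0, h) acc = (k0, h) :: acc := by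
  cases acc with
  | nil => rfl
  | cons a t => simp [PySem.List.insertBy, hacc a (by simp)]

-- the first maximal entry of l is the head of the insertion fold, and removing it
-- commutes with the fold
theorem pvFold_extract (l : List (String × Int)) (h : Int) (k : String)
    (rest acc : List (String × Int))
    (hacc : ∀ a ∈ acc, a.2 < h) (hmax : ∀ y ∈ l, y.2 ≤ h)
    (hfd : pvFindDel h l = some (k, rest)) :
    l.foldl (fun acc x => PySem.List.insertBy (fun a b => decide (b.2 < a.2)) x acc) acc
      = (k, h) :: rest.foldl (fun acc x => PySem.List.insertBy (fun a b => decide (b.2 < a.2)) x acc) acc := by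
  induction l generalizing acc k rest with
  | nil => simp [pvFindDel] at hfd
  | cons p t ih =>
    obtain ⟨k0, v0⟩ := p
    simp only [pvFindDel] at hfd
    split at hfd
    · rename_i hv
      obtain ⟨hk, hr⟩ := Prod.mk.injEq .. ▸ Option.some.injEq .. ▸ hfd
      subst hk hv
      cases hr
      simp only [List.foldl_cons, pvInsert_max k0 v0 acc hacc]
      exact pvFold_cons_max t k0 v0 acc (fun y hy => hmax y (by simp [hy]))
    · rename_i hv
      rcases Option.map_eq_some_iff.mp hfd with ⟨⟨k', r'⟩, hp, he⟩
      obtain ⟨hk, hr⟩ := Prod.mk.injEq .. ▸ he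
      subst hk
      subst hr
      have hv0 : v0 < h := by
        have := hmax (k0, v0) (by simp); omega
      simp only [List.foldl_cons]
      exact ih k' r'
        (PySem.List.insertBy (fun a b => decide (b.2 < a.2)) (k0, v0) acc)
        (fun a ha => by
          rcases (PySem.List.mem_insertBy _ _ _ _).mp ha with rfl | ha
          · exact hv0
          · exact hacc a ha)
        (fun y hy => hmax y (by simp [hy])) hp

-- removing the first maximal entry is popping the head of the stable reverse sort
theorem pvSorted_extract (l : List (String × Int)) (h : Int) (k : String)
    (rest : List (String × Int)) (hmax : ∀ y ∈ l, y.2 ≤ h)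
    (hfd : pvFindDel h l = some (k, rest)) :
    PySem.List.sorted l (fun kv => kv.2) true
      = (k, h) :: PySem.List.sorted rest (fun kv => kv.2) true := by
  rw [PySem.List.sorted_rev_eq_foldl_insertBy, PySem.List.sorted_rev_eq_foldl_insertBy]
  exact pvFold_extract l h k rest [] (by simp) hmax hfd

theorem pvFindDel_isSome (h : Int) (l : List (String × Int)) (hmem : h ∈ l.map (·.2)) :
    ∃ k rest, pvFindDel h l = some (k, rest) := by
  induction l with
  | nil => simp at hmem
  | cons p t ih =>
    obtain ⟨k0, v0⟩ := p
    by_cases hv : v0 = h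
    · exact ⟨k0, t, by simp [pvFindDel, hv]⟩
    · rcases ih (by
        rcases List.mem_map.mp hmem with ⟨y, hy, hyv⟩
        rcases List.mem_cons.mp hy with rfl | hy
        · exact absurd hyv hv
        · exact List.mem_map.mpr ⟨y, hy, hyv⟩) with ⟨k, rest, hfd⟩
      exact ⟨k, (k0, v0) :: rest, by simp [pvFindDel, hv, hfd]⟩

-- A's while-loop emits exactly the rows of the first entries of the stable reverse sort
theorem pvALoop_eq (n : Nat) :
    ∀ (l : List (String × Int)) (out : List String) (c : Int),
    n = (c - ((out.length : Int) - 2)).toNat → n ≤ l.length →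
    pvALoop c l out
      = some (out ++ ((PySem.List.sorted l (fun kv => kv.2) true).take n).map pvRow) := by
  induction n with
  | zero =>
    intro l out c hn _
    rw [pvALoop]
    simp only [List.take_zero, List.map_nil, List.append_nil]
    rw [if_neg (by omega)]
  | succ n ih =>
    intro l out c hn hlen
    have hl : l ≠ [] := by
      intro h; subst h; simp at hlen
    obtain ⟨h, hmax?⟩ : ∃ h, PySem.List.max? (l.map (·.2)) (fun v => v) = some h := by
      cases hm : PySem.List.max? (l.map (·.2)) (fun v => v) with
      | none => exact absurd (by simpa using (PySem.List.max?_eq_none_iff _ _).mp hm) hl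
      | some h => exact ⟨h, rfl⟩
    have hmem : h ∈ l.map (·.2) := PySem.List.max?_mem hmax?
    have hmax : ∀ y ∈ l, y.2 ≤ h := by
      intro y hy
      exact PySem.List.max?_isMax hmax? y.2 (List.mem_map.mpr ⟨y, hy, rfl⟩)
    obtain ⟨k, rest, hfd⟩ := pvFindDel_isSome h l hmem
    have hrest := pvFindDel_length h l k rest hfd
    rw [pvALoop, if_pos (by omega)]
    simp only [hmax?]
    have hsplit : (match hfd' : pvFindDel h l with
        | none => (none : Option (List String))
        | some (k, rest) => pvALoop c rest
            (out ++ ["<tr><td>" ++ k ++ "</td><td>" ++ PySem.Int.toStr h ++ "</td></tr>"]))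
        = pvALoop c rest (out ++ ["<tr><td>" ++ k ++ "</td><td>" ++ PySem.Int.toStr h ++ "</td></tr>"]) := by
      split
      · rename_i heq; rw [hfd] at heq; cases heq
      · rename_i k' rest' heq
        rw [hfd] at heq
        obtain ⟨rfl, rfl⟩ : k' = k ∧ rest' = rest := by
          cases heq; exact ⟨rfl, rfl⟩
        rfl
    rw [hsplit]
    rw [ih rest (out ++ ["<tr><td>" ++ k ++ "</td><td>" ++ PySem.Int.toStr h ++ "</td></tr>"]) c
        (by simp; omega) (by omega)]
    rw [pvSorted_extract l h k rest hmax hfd]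
    simp [pvRow]

-- B's indexed pass over the sorted prefix emits the same rows
theorem pvBLoop_eq (ordered : List (String × Int)) (n : Nat) (init : List String)
    (hlen : n ≤ ordered.length) :
    ((PySem.List.pyRange 0 (n : Int) 1).foldl
      (fun acc i =>
        acc.bind (fun rs =>
          (PySem.List.pyGet? ordered i).map (fun kv =>
            rs ++ ["<tr><td>" ++ kv.1 ++ "</td><td>" ++ PySem.Int.toStr kv.2 ++ "</td></tr>"])))
      (some init))
      = some (init ++ (ordered.take n).map pvRow) := by
  induction n with
  | zero => simp [PySem.List.pyRange]
  | succ n ih =>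
    have hn : n ≤ ordered.length := by omega
    rw [show ((n + 1 : Nat) : Int) = (n : Int) + 1 by push_cast; ring,
        PySem.List.pyRange_one_succ_right (by omega), List.foldl_append, ih hn]
    have hget : PySem.List.pyGet? ordered (n : Int)
        = some (ordered[n]'(by omega)) := by
      have := PySem.List.pyGet?_eq_some_getElem ordered (i := (n : Int)) (by omega)
        (by exact_mod_cast (by omega : n < ordered.length))
      simpa using this
    simp only [List.foldl_cons, List.foldl_nil, Option.bind_some, hget, Option.map_some]
    have hx : n < (List.map pvRow ordered).length := by simp; omega
    have htake := List.take_append_getElem hx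
    simp only [List.getElem_map] at htake
    simp only [pvRow] at htake
    simp [List.map_take, ← htake]

-- ===== VERDICT (by name: the statement is the Claim_ definition above) =====
theorem dict_html_spec : Claim_equal_dict_html := by
  intro d cutoff key_header value_header _ hpre
  unfold Spec_dict_html dict_html dict_html_alt
  unfold Pre_dict_html at hpre
  dsimp only
  set dd := PySem.Dict.ofList d with hdd
  set c := cutoff.getD ((dd.size : Int)) with hc
  have hsize : dd.size = dd.items.length := rfl
  have hctn : c.toNat ≤ dd.items.length := by omega
  rw [pvALoop_eq c.toNat dd.items _ c (by simp) hctn]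
  have hord : c.toNat ≤ (PySem.List.sorted dd.items (fun kv => kv.2) true).length := by
    rw [PySem.List.length_sorted]; exact hctn
  by_cases hc0 : 0 ≤ c
  · rw [show c = ((c.toNat : Int)) by omega, pvBLoop_eq _ c.toNat _ hord]
    simp
    rw [show ((max c 0).toNat = c.toNat) from by omega]
  · have hneg : PySem.List.pyRange 0 c 1 = [] := by
      simp [PySem.List.pyRange]; omega
    rw [hneg, show c.toNat = 0 from by omega]
    simp
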